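-- pv_equiv track=rewrite | github.com/vil02/adv_2021 | solutions/adv_2021_10.py | find_line_completion
-- ===== SOURCE A (Python) =====
-- def _opposite_dict():
--     return {')': '(', ']': '[', '>': '<', '}': '{'}
--
-- def get_score(in_str):
--     """returns a score of the line as described in part a"""
--     stack_data = []
--     res = None
--     for _ in in_str:
--         if _ in _opposite_dict().values():
--             stack_data.append(_)
--         elif stack_data and _ in _opposite_dict() \
--                 and _opposite_dict()[_] == stack_data[-1]:
--             stack_data.pop()
--         else:
--             res = _
--             break
--     score_dict = {None: 0, ')': 3, ']': 57, '}': 1197, '>': 25137}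
--     return score_dict[res]
--
-- def find_line_completion(in_str):
--     """returns the line competion"""
--     assert get_score(in_str) == 0
--     stack_data = []
--     for _ in in_str:
--         if _ in _opposite_dict().values():
--             stack_data.append(_)
--         else:
--             assert stack_data and _ in _opposite_dict() \
--                 and _opposite_dict()[_] == stack_data[-1]
--             stack_data.pop()
--     res = ''
--     inv_opposite_dict = dict(
--         zip(_opposite_dict().values(), _opposite_dict().keys()))
--     for _ in reversed(stack_data):
--         res += inv_opposite_dict[_]
--     return res
-- ===== SOURCE B (Python) =====
-- def find_line_completion(in_str):
--     """right-to-left scan: emit the completion directly while matching each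
--     pending closer with its opener; reject lines whose closers stay unmatched"""
--     close_of = {'(': ')', '[': ']', '<': '>', '{': '}'}
--     pending = []
--     out = []
--     for c in reversed(in_str):
--         if c in close_of:
--             if pending and pending[-1] == close_of[c]:
--                 pending.pop()
--             else:
--                 out.append(close_of[c])
--         else:
--             pending.append(c)
--     if pending:
--         raise ValueError('corrupted line: ' + in_str)
--     return ''.join(out)
-- ===== Notes on version B (the rewrite author's own statement) =====
-- stated objective: alternative
-- what changed: B scans the line RIGHT-to-left keeping a stack of pending closers and emits each completion character directly during the scan (rejecting lines whose closers stay unmatched), instead of A's two left-to-right scans with an opener stack followed by mapping the reversed leftover stack through an inverted dictionary.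
import Mathlib
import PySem

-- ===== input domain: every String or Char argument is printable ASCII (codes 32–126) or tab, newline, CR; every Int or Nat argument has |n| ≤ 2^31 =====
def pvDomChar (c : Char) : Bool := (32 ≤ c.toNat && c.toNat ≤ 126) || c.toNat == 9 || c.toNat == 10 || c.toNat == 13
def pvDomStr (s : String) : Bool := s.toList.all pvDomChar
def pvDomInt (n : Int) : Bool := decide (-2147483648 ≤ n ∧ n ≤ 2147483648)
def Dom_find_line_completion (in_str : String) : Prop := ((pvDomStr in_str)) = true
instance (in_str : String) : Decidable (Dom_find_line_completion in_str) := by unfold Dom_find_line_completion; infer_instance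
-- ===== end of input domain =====

-- B scans the line right-to-left with a stack of pending closers and emits the completion
-- characters directly during that scan, instead of A's two left-to-right scans plus a
-- final mapping of the reversed leftover opener stack (alternative traversal order).

-- ===== PORT A =====
-- _opposite_dict()
def oppDict : PySem.Dict Char Char :=
  PySem.Dict.ofList [(')', '('), (']', '['), ('>', '<'), ('}', '{')]

-- the for-loop of get_score: returns `res` (none = loop finished without break)
def gsLoop : List Char → List Char → Option Char
  | [], _ => none
  | c :: rest, stack =>
    if oppDict.values.contains c then gsLoop rest (c :: stack)
    else
      match stack, oppDict.get? c with
      | s :: t, some o => if o = s then gsLoop rest t else some c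
      | _, _ => some c

-- get_score; `none` is exactly Python's KeyError on score_dict[res]
def get_score? (in_str : String) : Option Int :=
  match gsLoop in_str.toList [] with
  | none => some 0
  | some ')' => some 3
  | some ']' => some 57
  | some '}' => some 1197
  | some '>' => some 25137
  | some _ => none

-- the second for-loop of find_line_completion; `none` is exactly the failed assert
def flLoop : List Char → List Char → Option (List Char)
  | [], stack => some stack
  | c :: rest, stack =>
    if oppDict.values.contains c then flLoop rest (c :: stack)
    else
      match stack, oppDict.get? c with
      | s :: t, some o => if o = s then flLoop rest t else none
      | _, _ => none

-- dict(zip(values, keys))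
def invOppDict : PySem.Dict Char Char :=
  PySem.Dict.ofList (oppDict.values.zip oppDict.keys)

-- the stack is kept head-as-top, so `reversed(stack_data)` is the list in order.
-- Failed asserts (Python raises) return ""; those inputs are outside Pre_.
-- inv_opposite_dict[_] can never KeyError on Pre_ inputs (stack holds openers); ported with getD.
def find_line_completion (in_str : String) : String :=
  if get_score? in_str = some 0 then
    match flLoop in_str.toList [] with
    | some stack =>
        String.ofList (stack.foldl (fun r c => r ++ [(invOppDict.get? c).getD c]) [])
    | none => ""
  else ""

-- ===== PORT B =====
-- close_of
def closeDict : PySem.Dict Char Char :=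
  PySem.Dict.ofList [('(', ')'), ('[', ']'), ('<', '>'), ('{', '}')]

-- body of B's single loop; state = (pending closers head-as-top, out in emission order)
def pvG (po : List Char × List Char) (c : Char) : List Char × List Char :=
  match closeDict.get? c with
  | some d => if po.1.head? = some d then (po.1.tail, po.2) else (po.1, po.2 ++ [d])
  | none => (c :: po.1, po.2)

-- `for c in reversed(in_str)` = foldl over the reversed char list; ''.join(out).
-- The final `if pending: raise ValueError` (reachable only outside Pre_) returns "".
def find_line_completion_alt (in_str : String) : String :=
  let po := in_str.toList.reverse.foldl pvG ([], [])
  if po.1.isEmpty then String.ofList po.2 else ""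

-- ===== PRECONDITION & SPEC =====
-- an opening bracket
def pvIsOpen (c : Char) : Bool :=
  c = '(' || c = '[' || c = '{' || c = '<'

-- the table used only by the precondition: each closing bracket with its
-- opening bracket written as a one-character string
def pvOpenerOf : List (Char × String) := [(')', "("), (']', "["), ('>', "<"), ('}', "{")]

-- the lookup used only by the precondition (a closing bracket to its opening one)
def pvOpp? (c : Char) : Option Char :=
  (pvOpenerOf.find? (fun p => p.1 = c)).bind (fun p => p.2.toList.head?)

-- every char is a bracket and every closing bracket matches the open bracket on top
def pvBalancedPrefix : List Char → List Char → Bool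
  | [], _ => true
  | c :: rest, stack =>
    if pvIsOpen c then pvBalancedPrefix rest (c :: stack)
    else
      match stack, pvOpp? c with
      | s :: t, some o => o == s && pvBalancedPrefix rest t
      | _, _ => false

-- Pre_: exactly the inputs on which Python A returns (elsewhere it raises
-- AssertionError on a mismatched or stray closing bracket, else KeyError).
def Pre_find_line_completion (in_str : String) : Prop :=
  pvBalancedPrefix in_str.toList [] = true
instance (in_str : String) : Decidable (Pre_find_line_completion in_str) := by
  unfold Pre_find_line_completion; infer_instance

def pvWitness_find_line_completion : String := "(((((((("

def Spec_find_line_completion (in_str : String) (out : String) : Prop :=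
  out = find_line_completion_alt in_str
instance (in_str : String) (out : String) : Decidable (Spec_find_line_completion in_str out) := by
  unfold Spec_find_line_completion; infer_instance

-- ===== CLAIM (what is proved, stated in full; the proofs are below) =====
def Claim_equal_find_line_completion : Prop :=
  ∀ (in_str : String), Dom_find_line_completion in_str →
    Pre_find_line_completion in_str →
    Spec_find_line_completion in_str (find_line_completion in_str)

-- ===== LEMMAS AND PROOFS =====

lemma oppDict_values : oppDict.values = ['(', '[', '<', '{'] := by decide

lemma pv_isOpen_eq (c : Char) :
    pvIsOpen c = (c = '(' || c = '[' || c = '{' || c = '<') := by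
  simp [pvIsOpen]

lemma pv_opp_none (c : Char) (h1 : c ≠ ')') (h2 : c ≠ ']') (h3 : c ≠ '}') (h4 : c ≠ '>') :
    pvOpp? c = none := by
  simp [pvOpp?, pvOpenerOf, List.find?, Ne.symm h1, Ne.symm h2, Ne.symm h3, Ne.symm h4]

lemma pv_get_opp (c : Char) : oppDict.get? c = pvOpp? c := by
  by_cases h1 : c = ')' ; · subst h1; decide
  by_cases h2 : c = ']' ; · subst h2; decide
  by_cases h3 : c = '}' ; · subst h3; decide
  by_cases h4 : c = '>' ; · subst h4; decide
  have hk : oppDict.keys = [')', ']', '>', '}'] := by decide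
  have hn : oppDict.get? c = none := by
    rw [PySem.Dict.get?_eq_none_iff_not_mem_keys, hk]; simp [h1, h2, h3, h4]
  rw [hn, pv_opp_none c h1 h2 h3 h4]

-- total closer function used only in lemma statements
def pvClo (c : Char) : Char := (closeDict.get? c).getD c

-- A's loop body (push opener / pop on closer), named for the invariant below
def pvStep (st : List Char) (c : Char) : List Char :=
  if closeDict.contains c then c :: st else st.tail

lemma pv_close_contains (c : Char) :
    closeDict.contains c = (c = '(' || c = '[' || c = '{' || c = '<') := by
  by_cases h1 : c = '(' ; · subst h1; decide
  by_cases h2 : c = '[' ; · subst h2; decide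
  by_cases h3 : c = '{' ; · subst h3; decide
  by_cases h4 : c = '<' ; · subst h4; decide
  have hk : closeDict.keys = ['(', '[', '<', '{'] := by decide
  rw [PySem.Dict.contains_eq_decide_mem_keys, hk]
  simp [h1, h2, h3, h4]

-- a closing bracket is not a key of close_of, and close_of of its opener is itself
lemma pv_closer_facts (c s : Char) (h : pvOpp? c = some s) :
    closeDict.get? c = none ∧ pvClo s = c := by
  by_cases h1 : c = ')'
  · subst h1
    have hs : some '(' = some s := by rw [← h]; decide
    cases hs; decide
  by_cases h2 : c = ']'
  · subst h2
    have hs : some '[' = some s := by rw [← h]; decide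
    cases hs; decide
  by_cases h3 : c = '}'
  · subst h3
    have hs : some '{' = some s := by rw [← h]; decide
    cases hs; decide
  by_cases h4 : c = '>'
  · subst h4
    have hs : some '<' = some s := by rw [← h]; decide
    cases hs; decide
  rw [pv_opp_none c h1 h2 h3 h4] at h
  exact absurd h (by simp)

-- one-step unfolding of the precondition checker (plain rfl, avoids equation-lemma side goals)
lemma pvB_cons (c : Char) (rest stack : List Char) :
    pvBalancedPrefix (c :: rest) stack =
      if pvIsOpen c then pvBalancedPrefix rest (c :: stack)
      else
        match stack, pvOpp? c with
        | s :: t, some o => o == s && pvBalancedPrefix rest t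
        | _, _ => false := rfl

-- A-side invariant: on a balanced prefix, the scoring loop finds no offender and
-- the asserted loop computes exactly the fold of pvStep.
lemma pvA_main : ∀ (cs : List Char) (stack : List Char),
    pvBalancedPrefix cs stack = true →
    gsLoop cs stack = none ∧ flLoop cs stack = some (cs.foldl pvStep stack) := by
  intro cs
  induction cs with
  | nil => intro stack _; simp [gsLoop, flLoop]
  | cons c rest ih =>
    intro stack h
    rw [pvB_cons] at h
    by_cases hop0 : pvIsOpen c = true
    · rw [if_pos hop0] at h
      have hop : (c = '(' || c = '[' || c = '{' || c = '<') = true := by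
        rw [← pv_isOpen_eq]; exact hop0
      have hmem' : c ∈ oppDict.values := by
        rw [oppDict_values]; simp at hop ⊢; tauto
      have hpc : closeDict.contains c = true := by rw [pv_close_contains]; exact hop
      obtain ⟨g1, g2⟩ := ih (c :: stack) h
      simp [gsLoop, flLoop, List.foldl, pvStep, hmem', hpc, g1, g2]
    · rw [if_neg hop0] at h
      have hop : ¬ (c = '(' || c = '[' || c = '{' || c = '<') = true := by
        rw [← pv_isOpen_eq]; exact hop0
      have hnm' : c ∉ oppDict.values := by
        rw [oppDict_values]; simp at hop ⊢; tauto
      have hpc : closeDict.contains c = false := by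
        rw [pv_close_contains]; simpa using hop
      rcases stack with _ | ⟨s, t⟩
      · rcases ho : pvOpp? c with _ | o <;> rw [ho] at h <;> simp at h
      · rcases ho : pvOpp? c with _ | o
        · rw [ho] at h; simp at h
        · rw [ho] at h
          simp only [Bool.and_eq_true, beq_iff_eq] at h
          obtain ⟨hos, hrest⟩ := h
          subst hos
          have hg : oppDict.get? c = some o := by rw [pv_get_opp, ho]
          obtain ⟨g1, g2⟩ := ih t hrest
          simp [gsLoop, flLoop, List.foldl, pvStep, hnm', hg, hpc, g1, g2]

-- B-side invariant: on a balanced prefix relative to stack st, the right-to-left fold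
-- (written as a foldr) returns the closers of the popped prefix of st as its pending
-- stack and exactly the closers of the new leftover openers as its output.
lemma pvB_main : ∀ (cs st : List Char), pvBalancedPrefix cs st = true →
    ∃ st₁ st₂ no, st = st₁ ++ st₂ ∧ cs.foldl pvStep st = no ++ st₂ ∧
      cs.foldr (fun c a => pvG a c) ([], []) = (st₁.map pvClo, no.map pvClo) := by
  intro cs
  induction cs with
  | nil =>
    intro st _
    exact ⟨[], st, [], rfl, rfl, rfl⟩
  | cons c rest ih =>
    intro st h
    rw [pvB_cons] at h
    by_cases hop0 : pvIsOpen c = true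
    · rw [if_pos hop0] at h
      have hop : (c = '(' || c = '[' || c = '{' || c = '<') = true := by
        rw [← pv_isOpen_eq]; exact hop0
      have hpc : closeDict.contains c = true := by rw [pv_close_contains]; exact hop
      have hget : closeDict.get? c = some (pvClo c) := by
        simp only [Bool.or_eq_true, decide_eq_true_eq] at hop
        rcases hop with ((h1 | h2) | h3) | h4
        · subst h1; decide
        · subst h2; decide
        · subst h3; decide
        · subst h4; decide
      have hstep : pvStep st c = c :: st := by simp [pvStep, hpc]
      obtain ⟨t₁, t₂, no, hsplit, hfold, hfr⟩ := ih (c :: st) h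
      rcases t₁ with _ | ⟨c₀, t₁'⟩
      · -- pending empty: c is a new unclosed opener, emit its closer
        simp only [List.nil_append] at hsplit
        refine ⟨[], st, no ++ [c], by simp, ?_, ?_⟩
        · rw [List.foldl_cons, hstep, hfold, ← hsplit]
          simp
        · rw [List.foldr_cons, hfr]
          simp [pvG, hget]
      · -- pending nonempty: its top is the closer of c (t₁ is a prefix of c :: st)
        have hc0 : c = c₀ ∧ st = t₁' ++ t₂ := by
          simpa using hsplit
        obtain ⟨hc0, hst⟩ := hc0
        subst hc0
        refine ⟨t₁', t₂, no, hst, ?_, ?_⟩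
        · rw [List.foldl_cons, hstep]; exact hfold
        · rw [List.foldr_cons, hfr]
          simp [pvG, hget]
    · rw [if_neg hop0] at h
      rcases st with _ | ⟨s, t⟩
      · rcases ho : pvOpp? c with _ | o <;> rw [ho] at h <;> simp at h
      · rcases ho : pvOpp? c with _ | o
        · rw [ho] at h; simp at h
        · rw [ho] at h
          simp only [Bool.and_eq_true, beq_iff_eq] at h
          obtain ⟨hos, hrest⟩ := h
          subst hos
          obtain ⟨hnone, hclo⟩ := pv_closer_facts c o ho
          have hpc : closeDict.contains c = false := by
            rw [PySem.Dict.contains_eq_decide_mem_keys]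
            have : c ∉ closeDict.keys := by
              intro hm
              rcases (PySem.Dict.get?_eq_none_iff_not_mem_keys (d := closeDict) (k := c)).mp hnone hm
            simp [this]
          have hstep : pvStep (o :: t) c = t := by simp [pvStep, hpc]
          obtain ⟨t₁, t₂, no, hsplit, hfold, hfr⟩ := ih t hrest
          refine ⟨o :: t₁, t₂, no, by simp [hsplit], ?_, ?_⟩
          · rw [List.foldl_cons, hstep]; exact hfold
          · rw [List.foldr_cons, hfr]
            simp [pvG, hnone, hclo]

lemma pv_inv_eq_close : invOppDict = closeDict := by decide

-- ===== VERDICT (by name: the statement is the Claim_ definition above) =====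
theorem find_line_completion_spec : Claim_equal_find_line_completion := by
  intro s _ hpre
  unfold Spec_find_line_completion find_line_completion find_line_completion_alt
  obtain ⟨hgs, hfl⟩ := pvA_main s.toList [] hpre
  have hscore : get_score? s = some 0 := by rw [get_score?, hgs]
  obtain ⟨st₁, st₂, no, hsplit, hfold, hfr⟩ := pvB_main s.toList [] hpre
  have h1 : st₁ = [] := (List.append_eq_nil_iff.mp hsplit.symm).1
  have h2 : st₂ = [] := (List.append_eq_nil_iff.mp hsplit.symm).2
  subst h1; subst h2
  simp only [List.append_nil] at hfold
  rw [if_pos hscore, hfl, hfold, List.foldl_reverse, hfr]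
  rw [pv_inv_eq_close]
  simp only [PySem.List.foldl_append_singleton_eq_map]
  rfl
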